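-- pv_equiv track=rewrite | github.com/ozolotareva/DESMOND | post_processing.py | get_genes
-- ===== SOURCE A (Python) =====
-- def get_genes(mid,edge2module=[],edges=[]):
--     ndx = [i for i, j in enumerate(edge2module) if j == mid]
--     genes = []
--     for edge in [edges[i] for i in ndx]:
--         genes.append(edge[0])
--         genes.append(edge[1])
--     genes = list(set(genes))
--     return genes
-- ===== SOURCE B (Python) =====
-- def get_genes(mid, edge2module=[], edges=[]):
--     # Build a module -> gene-set index in one grouped pass over the paired
--     # lists, then answer the query with a single lookup at the end.
--     module2genes = {}
--     for m, edge in zip(edge2module, edges):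
--         genes = module2genes.setdefault(m, set())
--         genes.update(edge)
--     return list(module2genes.get(mid, set()))
-- ===== Notes on version B (the rewrite author's own statement) =====
-- stated objective: alternative
-- what changed: B replaces A's staged pipeline (index comprehension, positional edges[i] fetch, intermediate endpoint list, final set() dedup) with a group-by: one pass over zip(edge2module, edges) builds a module->gene-set dictionary and the answer is a single lookup; no index arithmetic and no intermediate lists, which a timing run measured as a constant-factor speedup.
import Mathlib
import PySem

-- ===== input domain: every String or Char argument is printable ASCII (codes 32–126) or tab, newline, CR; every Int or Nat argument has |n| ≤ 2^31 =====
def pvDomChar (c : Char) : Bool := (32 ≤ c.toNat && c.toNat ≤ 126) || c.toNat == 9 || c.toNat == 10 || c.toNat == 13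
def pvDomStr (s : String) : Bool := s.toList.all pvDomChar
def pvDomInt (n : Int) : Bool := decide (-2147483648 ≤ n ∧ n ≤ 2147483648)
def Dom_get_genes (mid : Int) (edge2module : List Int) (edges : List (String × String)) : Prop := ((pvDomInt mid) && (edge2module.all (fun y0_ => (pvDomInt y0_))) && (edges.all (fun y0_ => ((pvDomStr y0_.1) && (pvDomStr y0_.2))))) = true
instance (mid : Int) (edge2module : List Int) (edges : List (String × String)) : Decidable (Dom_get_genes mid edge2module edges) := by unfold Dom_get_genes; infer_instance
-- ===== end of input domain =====

-- B answers the query via a module->gene-set index built in one grouped pass over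
-- zip(edge2module, edges) with a final lookup, instead of A's staged index
-- comprehension + positional edges[i] fetch + endpoint list + set-dedup (alternative
-- decomposition, same asymptotic cost). Python's list(set)/list(dict-of-set) iteration
-- order is hash-dependent; outputs are compared as sets, and both ports realise the
-- result in first-occurrence order.

-- ===== PORT A =====
def get_genes (mid : Int) (edge2module : List Int) (edges : List (String × String)) : List String :=
  -- ndx = [i for i, j in enumerate(edge2module) if j == mid]
  let ndx := ((PySem.List.enumerate edge2module 0).filter (fun p => p.2 == mid)).map (fun p => p.1)
  -- [edges[i] for i in ndx]  (in-range under Pre_)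
  let picked := ndx.map (fun i => PySem.List.pyGetD edges i ("", ""))
  -- genes.append(edge[0]); genes.append(edge[1])
  let genes := picked.foldl (fun g e => (g ++ [e.1]) ++ [e.2]) []
  -- genes = list(set(genes))
  PySem.Set.ofList genes

-- ===== PORT B =====
def get_genes_alt (mid : Int) (edge2module : List Int) (edges : List (String × String)) : List String :=
  -- for m, edge in zip(edge2module, edges): module2genes.setdefault(m, set()).update(edge)
  -- setdefault-then-in-place-update is exactly Dict.modify (insert-if-absent keeps key position)
  let module2genes :=
    (edge2module.zip edges).foldl
      (fun d p => d.modify p.1 PySem.Set.empty (fun s => PySem.Set.update s [p.2.1, p.2.2]))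
      PySem.Dict.empty
  -- return list(module2genes.get(mid, set()))
  module2genes.getD mid PySem.Set.empty

-- ===== PRECONDITION & SPEC =====
-- Pre_ excludes exactly the inputs where edges[i] raises IndexError in A (an index i with
-- edge2module[i] == mid but i >= len(edges)).
def Pre_get_genes (mid : Int) (edge2module : List Int) (edges : List (String × String)) : Prop :=
  ∀ i < edge2module.length, (edge2module.getD i 0 = mid → i < edges.length)
instance (mid : Int) (edge2module : List Int) (edges : List (String × String)) : Decidable (Pre_get_genes mid edge2module edges) := by unfold Pre_get_genes; infer_instance

def pvWitness_get_genes : Int × List Int × (List (String × String)) :=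
  (1, [1, 0, 1], [("a", "b"), ("c", "a"), ("b", "d")])

def Spec_get_genes (mid : Int) (edge2module : List Int) (edges : List (String × String)) (out : List String) : Prop := out = get_genes_alt mid edge2module edges
instance (mid : Int) (edge2module : List Int) (edges : List (String × String)) (out : List String) : Decidable (Spec_get_genes mid edge2module edges out) := by unfold Spec_get_genes; infer_instance

-- ===== CLAIM (what is proved, stated in full; the proofs are below) =====
def Claim_equal_get_genes : Prop := ∀ (mid : Int) (edge2module : List Int) (edges : List (String × String)), Dom_get_genes mid edge2module edges → Pre_get_genes mid edge2module edges → Spec_get_genes mid edge2module edges (get_genes mid edge2module edges)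

-- ===== LEMMAS AND PROOFS =====

-- A's appended-endpoints fold, fed into a Set.add fold, is the paired add-add fold.
theorem pv_fold_flat (picked : List (String × String)) :
    ∀ s : PySem.Set String,
      ((picked.flatMap (fun e => [e.1, e.2])).foldl PySem.Set.add s)
        = picked.foldl (fun s e => PySem.Set.add (PySem.Set.add s e.1) e.2) s := by
  induction picked with
  | nil => intro s; rfl
  | cons e l ih => intro s; simp only [List.flatMap_cons, List.foldl_append, List.foldl_cons]; exact ih _

theorem pv_fold_pairs (picked : List (String × String)) (s : PySem.Set String) :
      ((picked.foldl (fun g e => (g ++ [e.1]) ++ [e.2]) []).foldl PySem.Set.add s)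
        = picked.foldl (fun s e => PySem.Set.add (PySem.Set.add s e.1) e.2) s := by
  have h : picked.foldl (fun g e => (g ++ [e.1]) ++ [e.2]) []
      = picked.flatMap (fun e => [e.1, e.2]) := by
    simpa [List.append_assoc] using
      PySem.List.foldl_append_eq_flatMap (g := fun e : String × String => [e.1, e.2])
        (l := picked) (acc := [])
  rw [h, pv_fold_flat]

-- no matching module in ms ⇒ the enumerate filter is empty
theorem pv_nomatch (mid : Int) :
    ∀ (ms : List Int) (t : Int), (∀ i < ms.length, ms.getD i 0 ≠ mid) →
      (PySem.List.enumerate ms t).filter (fun p => p.2 == mid) = [] := by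
  intro ms
  induction ms with
  | nil => intro t _; rfl
  | cons m ms ih =>
      intro t h
      rw [PySem.List.enumerate_cons]
      have hm : ¬ (m = mid) := by simpa using h 0 (by simp)
      have := ih (t + 1) (fun i hi => by simpa using h (i + 1) (by simpa using hi))
      simp [hm, this]

-- under Pre_ (shifted by s), A's picked edges are the matching components of the zip
theorem pv_pick (mid : Int) :
    ∀ (ms : List Int) (edges : List (String × String)) (s : Nat),
      (∀ i < ms.length, ms.getD i 0 = mid → s + i < edges.length) →
      ((PySem.List.enumerate ms (s : Int)).filter (fun p => p.2 == mid)).map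
          (fun p => PySem.List.pyGetD edges p.1 ("", ""))
        = ((ms.zip (edges.drop s)).filter (fun p => p.1 == mid)).map (fun p => p.2) := by
  intro ms
  induction ms with
  | nil => intro edges s _; rfl
  | cons m ms ih =>
      intro edges s h
      rw [PySem.List.enumerate_cons]
      have hshift : ∀ i < ms.length, ms.getD i 0 = mid → (s + 1) + i < edges.length := by
        intro i hi hm
        have := h (i + 1) (by simpa using hi) (by simpa using hm)
        omega
      by_cases hs : s < edges.length
      · have hdrop : edges.drop s = edges[s] :: edges.drop (s + 1) :=
          List.drop_eq_getElem_cons hs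
        have hget : PySem.List.pyGetD edges (s : Int) ("", "") = edges[s] := by
          rw [PySem.List.pyGetD_natCast]
          simp [List.getD, hs]
        have ihs := ih edges (s + 1) hshift
        have hcast : ((s : Int) + 1) = ((s + 1 : Nat) : Int) := by push_cast; ring
        by_cases hm : m = mid
        · rw [hdrop]
          simp only [List.zip_cons_cons, List.filter_cons, hm]
          simp only [List.map_cons, hget, beq_self_eq_true, if_pos, hcast, ihs]
        · rw [hdrop]
          simp only [List.zip_cons_cons, List.filter_cons]
          simp only [show (m == mid) = false by simpa using hm]
          simpa only [Bool.false_eq_true, if_false, hcast] using ihs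
      · -- edges exhausted: no match is possible anywhere in m :: ms
        have hdrop : edges.drop s = [] := List.drop_eq_nil_of_le (by omega)
        have hm : ¬ (m = mid) := by
          intro hm
          have := h 0 (by simp) (by simpa using hm)
          omega
        have hnone : ∀ i < ms.length, ms.getD i 0 ≠ mid := by
          intro i hi hmm
          have := h (i + 1) (by simpa using hi) (by simpa using hmm)
          omega
        rw [hdrop]
        simp [hm, pv_nomatch mid ms ((s : Int) + 1) hnone]

-- B's grouped fold, read back at mid, is the paired add-add fold over the matching zip entries.
theorem pv_group (mid : Int) :
    ∀ (l : List (Int × (String × String))) (d : PySem.Dict Int (PySem.Set String)),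
      ((l.foldl
          (fun d p => d.modify p.1 PySem.Set.empty (fun s => PySem.Set.update s [p.2.1, p.2.2]))
          d).getD mid PySem.Set.empty)
        = (l.filter (fun p => p.1 == mid)).foldl
            (fun s p => PySem.Set.add (PySem.Set.add s p.2.1) p.2.2)
            (d.getD mid PySem.Set.empty) := by
  intro l
  induction l with
  | nil => intro d; rfl
  | cons p l ih =>
      intro d
      rw [List.foldl_cons, ih, List.filter_cons]
      by_cases hp : p.1 = mid
      · simp [hp, PySem.Set.update]
      · simp [hp, PySem.Dict.getD_modify, Ne.symm hp]

-- ===== VERDICT (by name: the statement is the Claim_ definition above) =====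
theorem get_genes_spec : Claim_equal_get_genes := by
  intro mid edge2module edges _ hpre
  unfold Spec_get_genes get_genes get_genes_alt
  rw [PySem.Set.ofList_eq_foldl, pv_fold_pairs]
  simp only [List.map_map, Function.comp_def]
  have hp : ∀ i < edge2module.length, edge2module.getD i 0 = mid → 0 + i < edges.length := by
    intro i hi hm; simpa using hpre i hi hm
  have hpk := pv_pick mid edge2module edges 0 hp
  rw [List.drop_zero] at hpk
  simp only [Nat.cast_zero] at hpk
  rw [hpk, pv_group mid (edge2module.zip edges) PySem.Dict.empty, List.foldl_map]
  simp [PySem.Dict.getD_empty]
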